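-- pv_equiv track=rewrite | github.com/josespinal/uom_check_python | check_uom-copy.py | get_base_category
-- ===== SOURCE A (Python) =====
-- def get_base_category(unit_text):
--     unit_text = unit_text.lower()
--     # Primero buscar patrones específicos de volumen
--     if any(u in unit_text for u in ["cuarto de galon", "cuarto de galón", "cuartos de galon", "cuartos de galón"]):
--         return "volume"
--     # Luego patrones generales
--     elif any(u in unit_text for u in ["ml", "litro", "fl oz", "galon", "galón", "galones"]):
--         return "volume"
--     elif any(u in unit_text for u in ["gr", "g", "oz", "onza", "onzas", "libra", "lb", "kg", "KG", "Kg"]):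
--         return "weight"
--     elif any(u in unit_text for u in ["pulgada", "pulgadas"]):
--         return "length"
--     elif any(u in unit_text for u in ["uds", "unidades", "unidad", "servicios", "servicio", "porciones", "porcion"]):
--         return "unit"
--     return None
-- ===== SOURCE B (Python) =====
-- # Different algorithm: instead of testing each pattern for membership in the text,
-- # scan the text's suffixes once, prefix-matching against a pattern -> (priority,
-- # category) dictionary and keeping the minimum-priority hit (priority = A's branch
-- # order, so precedence on overlapping matches is identical).
--
-- _PATTERNS = {
--     "cuarto de galon": (0, "volume"),
--     "cuarto de gal\u00f3n": (0, "volume"),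
--     "cuartos de galon": (0, "volume"),
--     "cuartos de gal\u00f3n": (0, "volume"),
--     "ml": (1, "volume"),
--     "litro": (1, "volume"),
--     "fl oz": (1, "volume"),
--     "galon": (1, "volume"),
--     "gal\u00f3n": (1, "volume"),
--     "galones": (1, "volume"),
--     "gr": (2, "weight"),
--     "g": (2, "weight"),
--     "oz": (2, "weight"),
--     "onza": (2, "weight"),
--     "onzas": (2, "weight"),
--     "libra": (2, "weight"),
--     "lb": (2, "weight"),
--     "kg": (2, "weight"),
--     "KG": (2, "weight"),
--     "Kg": (2, "weight"),
--     "pulgada": (3, "length"),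
--     "pulgadas": (3, "length"),
--     "uds": (4, "unit"),
--     "unidades": (4, "unit"),
--     "unidad": (4, "unit"),
--     "servicios": (4, "unit"),
--     "servicio": (4, "unit"),
--     "porciones": (4, "unit"),
--     "porcion": (4, "unit"),
-- }
--
--
-- def get_base_category(unit_text):
--     text = unit_text.lower()
--     best = None
--     for i in range(len(text)):
--         suffix = text[i:]
--         for pat, (pri, cat) in _PATTERNS.items():
--             if suffix.startswith(pat) and (best is None or pri < best[0]):
--                 best = (pri, cat)
--     return best[1] if best is not None else None
-- ===== Notes on version B (the rewrite author's own statement) =====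
-- stated objective: alternative
-- what changed: B inverts the traversal: instead of testing each of A's 29 patterns for substring membership branch by branch, it scans the text's suffixes once, prefix-matching against a pattern->(priority,category) dictionary and keeping the minimum-priority hit, where priority encodes A's branch order.
import Mathlib
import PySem

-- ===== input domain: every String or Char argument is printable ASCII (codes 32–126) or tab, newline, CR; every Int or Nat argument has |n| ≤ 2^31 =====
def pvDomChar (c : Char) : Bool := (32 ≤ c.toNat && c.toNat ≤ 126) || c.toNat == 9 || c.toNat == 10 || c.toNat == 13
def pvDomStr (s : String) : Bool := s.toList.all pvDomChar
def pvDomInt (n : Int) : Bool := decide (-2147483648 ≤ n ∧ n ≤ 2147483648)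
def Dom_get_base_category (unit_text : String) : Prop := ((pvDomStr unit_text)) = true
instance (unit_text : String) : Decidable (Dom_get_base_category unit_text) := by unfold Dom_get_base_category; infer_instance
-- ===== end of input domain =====

-- B replaces A's per-pattern substring tests with one scan over the text's suffixes,
-- prefix-matching a pattern -> (priority, category) table and keeping the minimum
-- priority hit (objective: alternative).


-- ===== PORT A =====
def get_base_category (unit_text : String) : Option String :=
  let t := PySem.Str.lower unit_text
  if ["cuarto de galon", "cuarto de galón", "cuartos de galon", "cuartos de galón"].any
       (fun u => PySem.Str.isIn u t) then some "volume"
  else if ["ml", "litro", "fl oz", "galon", "galón", "galones"].any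
       (fun u => PySem.Str.isIn u t) then some "volume"
  else if ["gr", "g", "oz", "onza", "onzas", "libra", "lb", "kg", "KG", "Kg"].any
       (fun u => PySem.Str.isIn u t) then some "weight"
  else if ["pulgada", "pulgadas"].any (fun u => PySem.Str.isIn u t) then some "length"
  else if ["uds", "unidades", "unidad", "servicios", "servicio", "porciones", "porcion"].any
       (fun u => PySem.Str.isIn u t) then some "unit"
  else none

-- ===== PORT B =====
-- _PATTERNS: pattern -> (priority, category); insertion order as in Source B.
def pvPatterns : List (String × Nat × String) :=
  [ ("cuarto de galon", 0, "volume"), ("cuarto de galón", 0, "volume"),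
    ("cuartos de galon", 0, "volume"), ("cuartos de galón", 0, "volume"),
    ("ml", 1, "volume"), ("litro", 1, "volume"), ("fl oz", 1, "volume"),
    ("galon", 1, "volume"), ("galón", 1, "volume"), ("galones", 1, "volume"),
    ("gr", 2, "weight"), ("g", 2, "weight"), ("oz", 2, "weight"),
    ("onza", 2, "weight"), ("onzas", 2, "weight"), ("libra", 2, "weight"),
    ("lb", 2, "weight"), ("kg", 2, "weight"), ("KG", 2, "weight"), ("Kg", 2, "weight"),
    ("pulgada", 3, "length"), ("pulgadas", 3, "length"),
    ("uds", 4, "unit"), ("unidades", 4, "unit"), ("unidad", 4, "unit"),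
    ("servicios", 4, "unit"), ("servicio", 4, "unit"),
    ("porciones", 4, "unit"), ("porcion", 4, "unit") ]

-- inner loop of Source B: one suffix against every dict entry
def pvStep (suffix : List Char) (best : Option (Nat × String)) : Option (Nat × String) :=
  pvPatterns.foldl
    (fun b e =>
      if PySem.Chars.startswith suffix e.1.toList && b.all (fun q => decide (e.2.1 < q.1))
      then some e.2 else b)
    best

-- outer loop of Source B: i = 0 .. len(text)-1, suffix = text[i:]
def pvScan : List Char → Option (Nat × String) → Option (Nat × String)
  | [], best => best
  | c :: rest, best => pvScan rest (pvStep (c :: rest) best)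

def get_base_category_alt (unit_text : String) : Option String :=
  let text := (PySem.Str.lower unit_text).toList
  (pvScan text none).map Prod.snd

-- ===== PRECONDITION & SPEC =====
def Spec_get_base_category (unit_text : String) (out : Option String) : Prop := out = get_base_category_alt unit_text
instance (unit_text : String) (out : Option String) : Decidable (Spec_get_base_category unit_text out) := by unfold Spec_get_base_category; infer_instance

-- ===== CLAIM (what is proved, stated in full; the proofs are below) =====
def Claim_equal_get_base_category : Prop := ∀ (unit_text : String), Dom_get_base_category unit_text → Spec_get_base_category unit_text (get_base_category unit_text)

-- ===== LEMMAS AND PROOFS =====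

-- proof-only: the value `best` holds when the minimal matched priority so far is k (5 = none yet)
def pvF : Nat → Option (Nat × String) := fun k =>
  if k = 0 then some (0, "volume") else if k = 1 then some (1, "volume")
  else if k = 2 then some (2, "weight") else if k = 3 then some (3, "length")
  else if k = 4 then some (4, "unit") else none

-- minimal priority among patterns that are a prefix of `suffix`, floored at k
def pvMFrom (suffix : List Char) (k : Nat) : Nat :=
  pvPatterns.foldl (fun m e => if PySem.Chars.startswith suffix e.1.toList then min m e.2.1 else m) k

-- minimal priority among patterns matched at any suffix, floored at k
def pvM : List Char → Nat → Nat
  | [], k => k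
  | c :: rest, k => pvM rest (pvMFrom (c :: rest) k)

lemma pvF_all (p k : Nat) (hk : k ≤ 5) (hp : p < 5) :
    (pvF k).all (fun q => decide (p < q.1)) = decide (p < k) := by
  interval_cases k <;> simp [pvF] <;> omega

lemma foldl_min_le (L : List (String × Nat × String)) (cs : List Char) (k : Nat) :
    L.foldl (fun m e => if PySem.Chars.startswith cs e.1.toList then min m e.2.1 else m) k ≤ k := by
  induction L generalizing k with
  | nil => simp
  | cons e L ih =>
    simp only [List.foldl_cons]
    split
    · exact le_trans (ih _) (Nat.min_le_left _ _)
    · exact ih _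

lemma pvMFrom_le (cs : List Char) (k : Nat) : pvMFrom cs k ≤ k := foldl_min_le _ _ _

lemma foldl_step_F (L : List (String × Nat × String))
    (hL : ∀ e ∈ L, pvF e.2.1 = some e.2 ∧ e.2.1 < 5)
    (cs : List Char) (k : Nat) (hk : k ≤ 5) :
    L.foldl
      (fun b e =>
        if PySem.Chars.startswith cs e.1.toList && b.all (fun q => decide (e.2.1 < q.1))
        then some e.2 else b)
      (pvF k)
    = pvF (L.foldl (fun m e => if PySem.Chars.startswith cs e.1.toList then min m e.2.1 else m) k) := by
  induction L generalizing k with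
  | nil => rfl
  | cons e L ih =>
    obtain ⟨hFe, hlt⟩ := hL e (List.mem_cons_self ..)
    have hrest : ∀ e' ∈ L, pvF e'.2.1 = some e'.2 ∧ e'.2.1 < 5 :=
      fun e' h => hL e' (List.mem_cons_of_mem _ h)
    have key :
        (if PySem.Chars.startswith cs e.1.toList && (pvF k).all (fun q => decide (e.2.1 < q.1))
         then some e.2 else pvF k)
        = pvF (if PySem.Chars.startswith cs e.1.toList then min k e.2.1 else k) := by
      rw [pvF_all e.2.1 k hk hlt]
      by_cases hsw : PySem.Chars.startswith cs e.1.toList = true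
      · by_cases hp : e.2.1 < k
        · have hm : min k e.2.1 = e.2.1 := by omega
          simp [hsw, hp, hm, ← hFe]
        · have hm : min k e.2.1 = k := by omega
          simp [hsw, hp, hm]
      · simp [hsw]
    simp only [List.foldl_cons]
    rw [key]
    exact ih hrest _ (by split <;> omega)

lemma pvStep_F (cs : List Char) (k : Nat) (hk : k ≤ 5) :
    pvStep cs (pvF k) = pvF (pvMFrom cs k) := by
  refine foldl_step_F pvPatterns ?_ cs k hk
  decide

lemma pvScan_F (cs : List Char) (k : Nat) (hk : k ≤ 5) :
    pvScan cs (pvF k) = pvF (pvM cs k) := by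
  induction cs generalizing k with
  | nil => rfl
  | cons c rest ih =>
    simp only [pvScan, pvM, pvStep_F _ k hk,
      ih _ (le_trans (pvMFrom_le (c :: rest) k) hk)]

lemma pvMFrom_le_iff (cs : List Char) (k j : Nat) :
    pvMFrom cs k ≤ j ↔ k ≤ j ∨ ∃ e ∈ pvPatterns, e.2.1 ≤ j ∧ PySem.Chars.startswith cs e.1.toList := by
  unfold pvMFrom
  generalize pvPatterns = L
  induction L generalizing k with
  | nil => simp
  | cons e L ih =>
    simp only [List.foldl_cons, List.mem_cons]
    by_cases hsw : PySem.Chars.startswith cs e.1.toList = true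
    · rw [hsw, if_pos rfl, ih]
      constructor
      · rintro (h | ⟨e', he', hj, hs⟩)
        · rcases min_le_iff.mp h with h | h
          · exact Or.inl h
          · exact Or.inr ⟨e, Or.inl rfl, h, hsw⟩
        · exact Or.inr ⟨e', Or.inr he', hj, hs⟩
      · rintro (h | ⟨e', (rfl | he'), hj, hs⟩)
        · exact Or.inl (le_trans (Nat.min_le_left _ _) h)
        · exact Or.inl (le_trans (Nat.min_le_right _ _) hj)
        · exact Or.inr ⟨e', he', hj, hs⟩
    · rw [if_neg hsw, ih]
      constructor
      · rintro (h | ⟨e', he', hj, hs⟩)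
        · exact Or.inl h
        · exact Or.inr ⟨e', Or.inr he', hj, hs⟩
      · rintro (h | ⟨e', (rfl | he'), hj, hs⟩)
        · exact Or.inl h
        · exact absurd hs hsw
        · exact Or.inr ⟨e', he', hj, hs⟩

lemma pvPatterns_ne_nil : ∀ e ∈ pvPatterns, e.1.toList ≠ [] := by decide

lemma pvM_le_iff (cs : List Char) (k j : Nat) :
    pvM cs k ≤ j ↔ k ≤ j ∨ ∃ e ∈ pvPatterns, e.2.1 ≤ j ∧ PySem.Chars.isIn e.1.toList cs := by
  induction cs generalizing k with
  | nil =>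
    simp only [pvM]
    constructor
    · exact Or.inl
    · rintro (h | ⟨e, he, hj, hs⟩)
      · exact h
      · have h0 := List.eq_nil_of_infix_nil ((PySem.Chars.isIn_iff_infix _ _).mp hs)
        exact absurd h0 (pvPatterns_ne_nil e he)
  | cons c rest ih =>
    rw [pvM, ih, pvMFrom_le_iff]
    constructor
    · rintro ((h | ⟨e, he, hj, hs⟩) | ⟨e, he, hj, hs⟩)
      · exact Or.inl h
      · exact Or.inr ⟨e, he, hj, (PySem.Chars.isIn_iff_infix _ _).mpr
          (List.infix_cons_iff.mpr (Or.inl ((PySem.Chars.startswith_iff _ _).mp hs)))⟩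
      · exact Or.inr ⟨e, he, hj, (PySem.Chars.isIn_iff_infix _ _).mpr
          (List.infix_cons_iff.mpr (Or.inr ((PySem.Chars.isIn_iff_infix _ _).mp hs)))⟩
    · rintro (h | ⟨e, he, hj, hs⟩)
      · exact Or.inl (Or.inl h)
      · rcases List.infix_cons_iff.mp ((PySem.Chars.isIn_iff_infix _ _).mp hs) with h' | h'
        · exact Or.inl (Or.inr ⟨e, he, hj, (PySem.Chars.startswith_iff _ _).mpr h'⟩)
        · exact Or.inr ⟨e, he, hj, (PySem.Chars.isIn_iff_infix _ _).mpr h'⟩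

lemma pvM_le (cs : List Char) (k : Nat) : pvM cs k ≤ k := by
  induction cs generalizing k with
  | nil => simp [pvM]
  | cons c rest ih => exact le_trans (ih _) (pvMFrom_le _ _)

-- proof-only: the patterns of priority group i
def pvG (i : Nat) (t : List Char) : Bool :=
  (pvPatterns.filter (fun e => e.2.1 == i)).any (fun e => PySem.Chars.isIn e.1.toList t)

lemma pvM_iff_groups (t : List Char) (j : Nat) (hj : j ≤ 4) :
    pvM t 5 ≤ j ↔ ∃ i, i ≤ j ∧ pvG i t = true := by
  rw [pvM_le_iff]
  constructor
  · rintro (h5 | ⟨e, he, hje, hs⟩)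
    · omega
    · exact ⟨e.2.1, hje, List.any_eq_true.mpr ⟨e, List.mem_filter.mpr ⟨he, by simp⟩, hs⟩⟩
  · rintro ⟨i, hij, hg⟩
    obtain ⟨e, hef, hs⟩ := List.any_eq_true.mp hg
    obtain ⟨he, hei⟩ := List.mem_filter.mp hef
    refine Or.inr ⟨e, he, ?_, hs⟩
    have : e.2.1 = i := by simpa using hei
    omega

-- ===== VERDICT (by name: the statement is the Claim_ definition above) =====
theorem get_base_category_spec : Claim_equal_get_base_category := by
  intro s _
  unfold Spec_get_base_category
  simp only [get_base_category, get_base_category_alt]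
  rw [show (none : Option (Nat × String)) = pvF 5 by simp [pvF], pvScan_F _ 5 (by norm_num)]
  have hg0 : (["cuarto de galon", "cuarto de galón", "cuartos de galon", "cuartos de galón"].any
      (fun u => PySem.Str.isIn u (PySem.Str.lower s)) = true) ↔
      pvG 0 ((PySem.Str.lower s).toList) = true := by
    simp [pvG, pvPatterns]
  have hg1 : (["ml", "litro", "fl oz", "galon", "galón", "galones"].any
      (fun u => PySem.Str.isIn u (PySem.Str.lower s)) = true) ↔
      pvG 1 ((PySem.Str.lower s).toList) = true := by
    simp [pvG, pvPatterns]
  have hg2 : (["gr", "g", "oz", "onza", "onzas", "libra", "lb", "kg", "KG", "Kg"].any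
      (fun u => PySem.Str.isIn u (PySem.Str.lower s)) = true) ↔
      pvG 2 ((PySem.Str.lower s).toList) = true := by
    simp [pvG, pvPatterns]
  have hg3 : (["pulgada", "pulgadas"].any
      (fun u => PySem.Str.isIn u (PySem.Str.lower s)) = true) ↔
      pvG 3 ((PySem.Str.lower s).toList) = true := by
    simp [pvG, pvPatterns]
  have hg4 : (["uds", "unidades", "unidad", "servicios", "servicio", "porciones", "porcion"].any
      (fun u => PySem.Str.isIn u (PySem.Str.lower s)) = true) ↔
      pvG 4 ((PySem.Str.lower s).toList) = true := by
    simp [pvG, pvPatterns]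
  split_ifs with c1 c2 c3 c4 c5
  · have h : pvM ((PySem.Str.lower s).toList) 5 = 0 :=
      Nat.le_zero.mp ((pvM_iff_groups _ 0 (by norm_num)).mpr ⟨0, le_refl 0, hg0.mp c1⟩)
    rw [PySem.Str.toList_lower] at h
    simp [h, pvF]
  · have hub : pvM ((PySem.Str.lower s).toList) 5 ≤ 1 :=
      (pvM_iff_groups _ 1 (by norm_num)).mpr ⟨1, le_refl 1, hg1.mp c2⟩
    have hlb : ¬ pvM ((PySem.Str.lower s).toList) 5 ≤ 0 := fun hc => by
      obtain ⟨i, hi, hg⟩ := (pvM_iff_groups _ 0 (by norm_num)).mp hc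
      interval_cases i
      · exact c1 (hg0.mpr hg)
    have h : pvM ((PySem.Str.lower s).toList) 5 = 1 := by omega
    rw [PySem.Str.toList_lower] at h
    simp [h, pvF]
  · have hub : pvM ((PySem.Str.lower s).toList) 5 ≤ 2 :=
      (pvM_iff_groups _ 2 (by norm_num)).mpr ⟨2, le_refl 2, hg2.mp c3⟩
    have hlb : ¬ pvM ((PySem.Str.lower s).toList) 5 ≤ 1 := fun hc => by
      obtain ⟨i, hi, hg⟩ := (pvM_iff_groups _ 1 (by norm_num)).mp hc
      interval_cases i
      · exact c1 (hg0.mpr hg)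
      · exact c2 (hg1.mpr hg)
    have h : pvM ((PySem.Str.lower s).toList) 5 = 2 := by omega
    rw [PySem.Str.toList_lower] at h
    simp [h, pvF]
  · have hub : pvM ((PySem.Str.lower s).toList) 5 ≤ 3 :=
      (pvM_iff_groups _ 3 (by norm_num)).mpr ⟨3, le_refl 3, hg3.mp c4⟩
    have hlb : ¬ pvM ((PySem.Str.lower s).toList) 5 ≤ 2 := fun hc => by
      obtain ⟨i, hi, hg⟩ := (pvM_iff_groups _ 2 (by norm_num)).mp hc
      interval_cases i
      · exact c1 (hg0.mpr hg)
      · exact c2 (hg1.mpr hg)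
      · exact c3 (hg2.mpr hg)
    have h : pvM ((PySem.Str.lower s).toList) 5 = 3 := by omega
    rw [PySem.Str.toList_lower] at h
    simp [h, pvF]
  · have hub : pvM ((PySem.Str.lower s).toList) 5 ≤ 4 :=
      (pvM_iff_groups _ 4 (by norm_num)).mpr ⟨4, le_refl 4, hg4.mp c5⟩
    have hlb : ¬ pvM ((PySem.Str.lower s).toList) 5 ≤ 3 := fun hc => by
      obtain ⟨i, hi, hg⟩ := (pvM_iff_groups _ 3 (by norm_num)).mp hc
      interval_cases i
      · exact c1 (hg0.mpr hg)
      · exact c2 (hg1.mpr hg)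
      · exact c3 (hg2.mpr hg)
      · exact c4 (hg3.mpr hg)
    have h : pvM ((PySem.Str.lower s).toList) 5 = 4 := by omega
    rw [PySem.Str.toList_lower] at h
    simp [h, pvF]
  · have hlb : ¬ pvM ((PySem.Str.lower s).toList) 5 ≤ 4 := fun hc => by
      obtain ⟨i, hi, hg⟩ := (pvM_iff_groups _ 4 (by norm_num)).mp hc
      interval_cases i
      · exact c1 (hg0.mpr hg)
      · exact c2 (hg1.mpr hg)
      · exact c3 (hg2.mpr hg)
      · exact c4 (hg3.mpr hg)
      · exact c5 (hg4.mpr hg)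
    have hle := pvM_le ((PySem.Str.lower s).toList) 5
    have h : pvM ((PySem.Str.lower s).toList) 5 = 5 := by omega
    rw [PySem.Str.toList_lower] at h
    simp [h, pvF]
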